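-- pv_equiv track=rewrite | github.com/zhenlan0426/MathComp | functions.py | naive_parse
-- ===== SOURCE A (Python) =====
-- def naive_parse(answer):
--     out = []
--     start = False
--     end = False
--     for l in reversed(list(answer)):
--         if l in '0123456789' and not end:
--             start = True
--             out.append(l)
--         else:
--             if start:
--                 end = True
--
--     out = reversed(out)
--     return int(''.join(out))
-- ===== SOURCE B (Python) =====
-- def naive_parse(answer):
--     rev = answer[::-1]
--     n = len(rev)
--     k = 0
--     while k < n and rev[k] not in '0123456789':
--         k += 1
--     m = k
--     while m < n and rev[m] in '0123456789':
--         m += 1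
--     return int(rev[k:m][::-1])
-- ===== Notes on version B (the rewrite author's own statement) =====
-- stated objective: simpler
-- what changed: Replaces the start/end flag state machine over every character with two index scans on the reversed string (skip to the last digit, take the digit run) and one slice; no per-character list building.
import Mathlib
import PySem

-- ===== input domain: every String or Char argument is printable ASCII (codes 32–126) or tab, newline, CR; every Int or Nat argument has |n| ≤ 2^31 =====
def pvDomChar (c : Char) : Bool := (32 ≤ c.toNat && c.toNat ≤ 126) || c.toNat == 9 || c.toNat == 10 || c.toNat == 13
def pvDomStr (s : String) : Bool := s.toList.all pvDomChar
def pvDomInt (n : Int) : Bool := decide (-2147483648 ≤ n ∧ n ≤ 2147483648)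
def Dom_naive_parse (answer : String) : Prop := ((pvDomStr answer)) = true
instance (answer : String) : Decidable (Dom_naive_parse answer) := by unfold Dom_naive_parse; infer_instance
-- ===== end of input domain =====

-- B replaces A's start/end flag state machine with two index scans on the reversed
-- string (skip non-digits, take the digit run) and a slice; same O(n), simpler.

-- ===== PORT A =====
def pvDigitsA : List Char := "0123456789".toList

-- the for-loop over reversed(answer): state (out, start, end)
def pvLoopA : List Char → List Char → Bool → Bool → List Char
  | [], out, _, _ => out
  | l :: rest, out, start, end_ =>
    if pvDigitsA.contains l && !end_ then
      pvLoopA rest (out ++ [l]) true end_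
    else
      pvLoopA rest out start (if start then true else end_)

def naive_parse (answer : String) : Int :=
  let out := pvLoopA answer.toList.reverse [] false false
  (PySem.Int.ofStr? (String.mk out.reverse)).getD 0

-- ===== PORT B =====
def pvDigitsB : List Char := "0123456789".toList

-- first while loop: advance k past non-digits (returns the remaining suffix rev[k:])
def pvSkipB : List Char → List Char
  | [] => []
  | c :: rest => if pvDigitsB.contains c then c :: rest else pvSkipB rest

-- second while loop: take the digit run rev[k:m]
def pvTakeB : List Char → List Char
  | [] => []
  | c :: rest => if pvDigitsB.contains c then c :: pvTakeB rest else []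

def naive_parse_alt (answer : String) : Int :=
  let rev := answer.toList.reverse
  let grp := pvTakeB (pvSkipB rev)
  (PySem.Int.ofStr? (String.mk grp.reverse)).getD 0

-- ===== PRECONDITION & SPEC =====
-- Pre_ excludes digit-free strings, on which both Pythons raise ValueError.
def Pre_naive_parse (answer : String) : Prop :=
  (answer.toList.any (fun c => decide ('0' ≤ c) && decide (c ≤ '9'))) = true
instance (answer : String) : Decidable (Pre_naive_parse answer) := by
  unfold Pre_naive_parse; infer_instance

def pvWitness_naive_parse : String := "a1"

def Spec_naive_parse (answer : String) (out : Int) : Prop := out = naive_parse_alt answer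
instance (answer : String) (out : Int) : Decidable (Spec_naive_parse answer out) := by
  unfold Spec_naive_parse; infer_instance

-- ===== CLAIM (what is proved, stated in full; the proofs are below) =====
def Claim_equal_naive_parse : Prop := ∀ (answer : String), Dom_naive_parse answer → Pre_naive_parse answer → Spec_naive_parse answer (naive_parse answer)

-- ===== LEMMAS AND PROOFS =====

-- once end is set, A's loop appends nothing more
theorem pvLoopA_end (rev : List Char) : ∀ out start, pvLoopA rev out start true = out := by
  induction rev with
  | nil => intro out start; rfl
  | cons l rest ih =>
    intro out start
    simp only [pvLoopA, Bool.not_true, Bool.and_false, Bool.false_eq_true, if_false]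
    split <;> exact ih _ _

-- with start set, A's loop collects exactly the leading digit run
theorem pvLoopA_start (rev : List Char) : ∀ out, pvLoopA rev out true false = out ++ pvTakeB rev := by
  induction rev with
  | nil => intro out; simp [pvLoopA, pvTakeB]
  | cons l rest ih =>
    intro out
    have hBA : pvDigitsB = pvDigitsA := rfl
    by_cases h : pvDigitsA.contains l = true
    · simp only [pvLoopA, pvTakeB, hBA, h, Bool.not_false, Bool.and_true, if_true, ih]
      simp
    · simp only [pvLoopA, pvTakeB, hBA, h, Bool.false_and, Bool.not_false, Bool.and_true,
        if_false, if_true, pvLoopA_end]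
      simp [h]

-- from the initial state, A's loop = take digits after skipping non-digits
theorem pvLoopA_eq (rev : List Char) : ∀ out, pvLoopA rev out false false = out ++ pvTakeB (pvSkipB rev) := by
  induction rev with
  | nil => intro out; simp [pvLoopA, pvSkipB, pvTakeB]
  | cons l rest ih =>
    intro out
    have hBA : pvDigitsB = pvDigitsA := rfl
    by_cases h : pvDigitsA.contains l = true
    · simp only [pvLoopA, pvSkipB, pvTakeB, hBA, h, Bool.not_false, Bool.and_true, if_true,
        pvLoopA_start]
      simp
    · simp only [pvLoopA, pvSkipB, hBA, h, Bool.not_false, Bool.and_true, if_false]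
      exact ih out

-- ===== VERDICT (by name: the statement is the Claim_ definition above) =====
theorem naive_parse_spec : Claim_equal_naive_parse := by
  intro answer _ _
  unfold Spec_naive_parse naive_parse naive_parse_alt
  rw [pvLoopA_eq]
  simp
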